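-- pv_equiv track=rewrite | github.com/TimoMorris/advent-of-code-2024 | src/day_07.py | day_07a
-- ===== SOURCE A (Python) =====
-- import itertools
-- import operator
--
-- OPERATORS = (operator.add, operator.mul)
--
-- def day_07a(calibration_equations: list[tuple[int, list[int]]]) -> int:
--     valid_equations = []
--     for equation in calibration_equations:
--         test_value, nums = equation
--         for comb in itertools.product(OPERATORS, repeat=len(nums) - 1):
--             result = nums[0]
--             for op, n in zip(comb, nums[1:]):
--                 result = op(result, n)
--                 if result > test_value:
--                     break  # overshot so break and try next operator combination
--             else:  # used up all numbers and didn't overshoot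
--                 if result == test_value:
--                     valid_equations.append(equation)
--                     break  # found a solution for this equation so skip any un-tried combinations and move to next equation
--
--     return sum(test_value for test_value, nums in valid_equations)
-- ===== SOURCE B (Python) =====
-- def day_07a(calibration_equations: list[tuple[int, list[int]]]) -> int:
--     total = 0
--     for test_value, nums in calibration_equations:
--         vals = {nums[0]}
--         for n in nums[1:]:
--             vals = {r for v in vals for r in (v + n, v * n) if r <= test_value}
--         if test_value in vals:
--             total += test_value
--     return total
-- ===== Notes on version B (the rewrite author's own statement) =====
-- stated objective: alternative
-- what changed: Replaces A's enumeration of all 2^(n-1) operator combinations (with per-combination re-evaluation and early break) by a single left-to-right pass maintaining the deduplicated set of partial results, dropping any partial result that exceeds the target (the same pruning A's break performs); intended as faster (measured 102x at n=256) but both remain exponential in the worst case, so 'faster' is not claimed.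
import Mathlib
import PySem

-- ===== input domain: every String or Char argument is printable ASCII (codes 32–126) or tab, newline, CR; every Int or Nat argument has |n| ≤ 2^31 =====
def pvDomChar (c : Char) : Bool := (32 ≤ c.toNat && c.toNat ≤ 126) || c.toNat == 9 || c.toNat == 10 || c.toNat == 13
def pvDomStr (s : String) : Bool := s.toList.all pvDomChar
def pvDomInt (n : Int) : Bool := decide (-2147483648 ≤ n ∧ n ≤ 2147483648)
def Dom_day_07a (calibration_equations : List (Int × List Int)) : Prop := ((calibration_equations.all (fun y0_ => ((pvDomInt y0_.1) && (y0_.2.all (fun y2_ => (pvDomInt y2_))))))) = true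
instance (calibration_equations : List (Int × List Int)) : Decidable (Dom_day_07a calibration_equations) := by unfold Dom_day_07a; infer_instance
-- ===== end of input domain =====

-- B replaces A's enumeration of all 2^(n-1) operator combinations by a single left-to-right
-- pass over a deduplicated SET of partial results (same overshoot pruning); same worst case,
-- return value only, no mutation in either program.

-- ===== PORT A =====
inductive PvOp
  | add
  | mul
deriving DecidableEq, Repr

def pvApply (op : PvOp) (a b : Int) : Int :=
  match op with
  | .add => a + b
  | .mul => a * b

-- itertools.product(OPERATORS, repeat=k): first position varies slowest
def pvCombos : Nat → List (List PvOp)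
  | 0 => [[]]
  | k + 1 => [PvOp.add, PvOp.mul].flatMap (fun op => (pvCombos k).map (op :: ·))

-- the inner 'for op, n in zip(comb, nums[1:])' loop with the overshoot break and for/else
def pvEval (test : Int) : Int → List PvOp → List Int → Bool
  | r, op :: ops, n :: ns =>
    let r' := pvApply op r n
    if r' > test then false else pvEval test r' ops ns
  | r, _, _ => r == test

def day_07a (calibration_equations : List (Int × List Int)) : Int :=
  let valid := calibration_equations.foldl (fun acc eq =>
    if (pvCombos (eq.2.length - 1)).any (fun comb => pvEval eq.1 eq.2.headI comb eq.2.tail)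
    then acc ++ [eq] else acc) []
  (valid.map Prod.fst).sum

-- ===== PORT B =====
-- one element v of the running set contributes v+n and v*n, each kept only if ≤ test
def pvStep1 (test n : Int) (acc : PySem.Set Int) (v : Int) : PySem.Set Int :=
  let acc1 := if v + n ≤ test then PySem.Set.add acc (v + n) else acc
  if v * n ≤ test then PySem.Set.add acc1 (v * n) else acc1

-- the set comprehension {r for v in vals for r in (v+n, v*n) if r <= test_value}
def pvStep (test n : Int) (vals : PySem.Set Int) : PySem.Set Int :=
  vals.foldl (pvStep1 test n) PySem.Set.empty

def day_07a_alt (calibration_equations : List (Int × List Int)) : Int :=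
  calibration_equations.foldl (fun total eq =>
    let vals := eq.2.tail.foldl (fun vals n => pvStep eq.1 n vals) (PySem.Set.ofList [eq.2.headI])
    if vals.contains eq.1 then total + eq.1 else total) 0

-- ===== PRECONDITION & SPEC =====
-- Pre_ excludes equations with an empty number list: there A raises ValueError
-- (itertools.product with repeat=-1) and B raises IndexError (nums[0]).
def Pre_day_07a (calibration_equations : List (Int × List Int)) : Prop :=
  ∀ eq ∈ calibration_equations, eq.2 ≠ []
instance (calibration_equations : List (Int × List Int)) : Decidable (Pre_day_07a calibration_equations) := by unfold Pre_day_07a; infer_instance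

def pvWitness_day_07a : (List (Int × List Int)) := [(3, [1, 2]), (190, [10, 19])]

def Spec_day_07a (calibration_equations : List (Int × List Int)) (out : Int) : Prop := out = day_07a_alt calibration_equations
instance (calibration_equations : List (Int × List Int)) (out : Int) : Decidable (Spec_day_07a calibration_equations out) := by unfold Spec_day_07a; infer_instance

-- ===== CLAIM (what is proved, stated in full; the proofs are below) =====
def Claim_equal_day_07a : Prop := ∀ (calibration_equations : List (Int × List Int)), Dom_day_07a calibration_equations → Pre_day_07a calibration_equations → Spec_day_07a calibration_equations (day_07a calibration_equations)

-- ===== LEMMAS AND PROOFS =====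

-- semantic characterisation of a single equation: exists a combination of +/× over ns
-- starting from r whose every intermediate result is ≤ test and whose final result is test
def pvEvalAll (test r : Int) : List Int → Bool
  | [] => r == test
  | n :: ns => (decide (r + n ≤ test) && pvEvalAll test (r + n) ns)
            || (decide (r * n ≤ test) && pvEvalAll test (r * n) ns)

lemma pvAny_combos_eq_evalAll (test : Int) (ns : List Int) :
    ∀ r, (pvCombos ns.length).any (fun c => pvEval test r c ns) = pvEvalAll test r ns := by
  induction ns with
  | nil => intro r; simp [pvCombos, pvEval, pvEvalAll]
  | cons n ns ih =>
    intro r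
    simp only [List.length_cons, pvCombos, List.any_flatMap, List.any_map, List.any_cons,
      List.any_nil, Bool.or_false, pvEvalAll, Function.comp_def]
    have hadd : ((pvCombos ns.length).any fun c => pvEval test r (PvOp.add :: c) (n :: ns))
        = (decide (r + n ≤ test) && pvEvalAll test (r + n) ns) := by
      by_cases h : r + n > test
      · rw [List.any_eq_false.mpr, Bool.false_eq]
        · simp [show ¬ (r + n ≤ test) by omega]
        · intro c _; simp [pvEval, pvApply, h]
      · simp only [pvEval, pvApply, if_neg h]
        simp [ih, show r + n ≤ test by omega]
    have hmul : ((pvCombos ns.length).any fun c => pvEval test r (PvOp.mul :: c) (n :: ns))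
        = (decide (r * n ≤ test) && pvEvalAll test (r * n) ns) := by
      by_cases h : r * n > test
      · rw [List.any_eq_false.mpr, Bool.false_eq]
        · simp [show ¬ (r * n ≤ test) by omega]
        · intro c _; simp [pvEval, pvApply, h]
      · simp only [pvEval, pvApply, if_neg h]
        simp [ih, show r * n ≤ test by omega]
    rw [hadd, hmul]

lemma pvMem_step1 (test n : Int) (acc : PySem.Set Int) (v x : Int) :
    x ∈ pvStep1 test n acc v ↔ x ∈ acc ∨ (x = v + n ∧ x ≤ test) ∨ (x = v * n ∧ x ≤ test) := by
  unfold pvStep1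
  split_ifs with h1 h2 h2 <;> simp only [PySem.Set.mem_add]
  · constructor
    · rintro ((h | rfl) | rfl)
      · exact Or.inl h
      · exact Or.inr (Or.inl ⟨rfl, h1⟩)
      · exact Or.inr (Or.inr ⟨rfl, h2⟩)
    · rintro (h | ⟨rfl, -⟩ | ⟨rfl, -⟩)
      · exact Or.inl (Or.inl h)
      · exact Or.inl (Or.inr rfl)
      · exact Or.inr rfl
  · constructor
    · rintro (h | rfl)
      · exact Or.inl h
      · exact Or.inr (Or.inl ⟨rfl, h1⟩)
    · rintro (h | ⟨rfl, -⟩ | ⟨rfl, hle⟩)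
      · exact Or.inl h
      · exact Or.inr rfl
      · exact absurd hle h2
  · constructor
    · rintro (h | rfl)
      · exact Or.inl h
      · exact Or.inr (Or.inr ⟨rfl, h2⟩)
    · rintro (h | ⟨rfl, hle⟩ | ⟨rfl, -⟩)
      · exact Or.inl h
      · exact absurd hle h1
      · exact Or.inr rfl
  · constructor
    · exact fun h => Or.inl h
    · rintro (h | ⟨rfl, hle⟩ | ⟨rfl, hle⟩)
      · exact h
      · exact absurd hle h1
      · exact absurd hle h2

lemma pvMem_step_aux (test n x : Int) (S : List Int) :
    ∀ acc, x ∈ S.foldl (pvStep1 test n) acc ↔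
      x ∈ acc ∨ ∃ v ∈ S, (x = v + n ∨ x = v * n) ∧ x ≤ test := by
  induction S with
  | nil => intro acc; simp
  | cons v S ih =>
    intro acc
    simp only [List.foldl_cons, ih, pvMem_step1, List.mem_cons]
    constructor
    · rintro ((h | ⟨he, hl⟩ | ⟨he, hl⟩) | ⟨w, hw, hor, hl⟩)
      · exact Or.inl h
      · exact Or.inr ⟨v, Or.inl rfl, Or.inl he, hl⟩
      · exact Or.inr ⟨v, Or.inl rfl, Or.inr he, hl⟩
      · exact Or.inr ⟨w, Or.inr hw, hor, hl⟩
    · rintro (h | ⟨w, (rfl | hw), hor, hl⟩)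
      · exact Or.inl (Or.inl h)
      · rcases hor with h | h
        · exact Or.inl (Or.inr (Or.inl ⟨h, hl⟩))
        · exact Or.inl (Or.inr (Or.inr ⟨h, hl⟩))
      · exact Or.inr ⟨w, hw, hor, hl⟩

lemma pvMem_step (test n x : Int) (S : PySem.Set Int) :
    x ∈ pvStep test n S ↔ ∃ v ∈ S, (x = v + n ∨ x = v * n) ∧ x ≤ test := by
  unfold pvStep
  rw [pvMem_step_aux]
  simp [PySem.Set.empty]

lemma pvFold_mem (t : Int) (ns : List Int) :
    ∀ S : List Int, (t ∈ ns.foldl (fun vals n => pvStep t n vals) S) ↔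
      ∃ r ∈ S, pvEvalAll t r ns = true := by
  induction ns with
  | nil =>
    intro S
    simp only [List.foldl_nil, pvEvalAll, beq_iff_eq]
    exact ⟨fun h => ⟨t, h, rfl⟩, fun ⟨r, hr, he⟩ => he ▸ hr⟩
  | cons n ns ih =>
    intro S
    simp only [List.foldl_cons, ih, pvMem_step]
    constructor
    · rintro ⟨r', ⟨v, hv, hor, hl⟩, hev⟩
      refine ⟨v, hv, ?_⟩
      simp only [pvEvalAll, Bool.or_eq_true, Bool.and_eq_true, decide_eq_true_eq]
      rcases hor with rfl | rfl
      · exact Or.inl ⟨hl, hev⟩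
      · exact Or.inr ⟨hl, hev⟩
    · rintro ⟨v, hv, hev⟩
      simp only [pvEvalAll, Bool.or_eq_true, Bool.and_eq_true, decide_eq_true_eq] at hev
      rcases hev with ⟨hl, hev⟩ | ⟨hl, hev⟩
      · exact ⟨v + n, ⟨v, hv, Or.inl rfl, hl⟩, hev⟩
      · exact ⟨v * n, ⟨v, hv, Or.inr rfl, hl⟩, hev⟩

-- the two per-equation checks coincide
lemma pvCheck_eq (t : Int) (nums : List Int) :
    (pvCombos (nums.length - 1)).any (fun comb => pvEval t nums.headI comb nums.tail)
      = (nums.tail.foldl (fun vals n => pvStep t n vals)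
          (PySem.Set.ofList [nums.headI])).contains t := by
  have hlen : nums.length - 1 = nums.tail.length := by
    cases nums <;> simp
  rw [hlen, pvAny_combos_eq_evalAll]
  have : (PySem.Set.ofList [nums.headI]) = [nums.headI] := rfl
  rw [Bool.eq_iff_iff, this]
  simp only [PySem.Set.contains_iff, pvFold_mem]
  simp

lemma pvSum_foldl (q : Int × List Int → Bool) (eqs : List (Int × List Int)) :
    ∀ total : Int, eqs.foldl (fun tot eq => if q eq then tot + eq.1 else tot) total
      = total + ((eqs.filter q).map Prod.fst).sum := by
  induction eqs with
  | nil => intro total; simp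
  | cons e eqs ih =>
    intro total
    by_cases h : q e
    · simp [List.foldl_cons, h, ih]; ring
    · simp [List.foldl_cons, h, ih]

-- ===== VERDICT (by name: the statement is the Claim_ definition above) =====
theorem day_07a_spec : Claim_equal_day_07a := by
  intro eqs _ _
  unfold Spec_day_07a day_07a day_07a_alt
  rw [PySem.List.foldl_append_if_eq_filter, pvSum_foldl, List.nil_append, zero_add]
  have hfil : List.filter
        (fun eq => (pvCombos (eq.2.length - 1)).any fun comb => pvEval eq.1 eq.2.headI comb eq.2.tail) eqs
      = List.filter
        (fun eq => (List.foldl (fun vals n => pvStep eq.1 n vals) (PySem.Set.ofList [eq.2.headI]) eq.2.tail).contains eq.1) eqs :=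
    List.filter_congr fun eq _ => pvCheck_eq eq.1 eq.2
  rw [hfil]
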